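-- pv_equiv track=rewrite | github.com/fgenie/rims_minimal | src/utils/llm_query_utils.py | separate_plan_code
-- ===== SOURCE A (Python) =====
-- def separate_plan_code(rawstr: str) -> tuple:
--     # used for 5_cohlike_prompt
--     # p2c results in plan\ncode so split it.
--     # new p2c result will not be affected by this. so let it be here still in case of revert
--     rawstr = rawstr.strip()
--     lines = rawstr.split("\n")
--     found_code = False
--     for i, l in enumerate(lines):
--         if l.startswith("def ") and l.strip().endswith(":"):
--             found_code = True
--             break
--     if found_code:
--         plan = "\n".join(lines[:i])
--         code = "\n".join(lines[i:])
--     else: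
--         plan, code = None, None
--     return plan, code  # plan never used...
-- ===== SOURCE B (Python) =====
-- def _sep(s):
--     # s is the text starting at a line boundary; recursive descent over the
--     # raw character stream (no split/join): returns None if no header line,
--     # else (plan_prefix_or_None, code_suffix), plan built back-to-front.
--     nl = s.find("\n")
--     line = s if nl == -1 else s[:nl]
--     if line.startswith("def ") and line.rstrip().endswith(":"):
--         return (None, s)
--     if nl == -1:
--         return None
--     r = _sep(s[nl + 1:])
--     if r is None:
--         return None
--     p, c = r
--     return (line if p is None else line + "\n" + p, c)
--
--
-- def separate_plan_code(rawstr: str) -> tuple: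
--     s = rawstr.strip()
--     r = _sep(s)
--     if r is None:
--         return None, None
--     p, c = r
--     return ("" if p is None else p, c)
-- ===== Notes on version B (the rewrite author's own statement) =====
-- stated objective: alternative
-- what changed: Replaces A's split-into-a-line-list, indexed scan with a found-flag and two join-of-slices reconstructions by a recursive descent directly on the character stream: each step cuts one line off with find/slicing, recurses on the remaining suffix, and builds the plan back-to-front on return (the code part is the remaining suffix itself, never re-joined).
import Mathlib
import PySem

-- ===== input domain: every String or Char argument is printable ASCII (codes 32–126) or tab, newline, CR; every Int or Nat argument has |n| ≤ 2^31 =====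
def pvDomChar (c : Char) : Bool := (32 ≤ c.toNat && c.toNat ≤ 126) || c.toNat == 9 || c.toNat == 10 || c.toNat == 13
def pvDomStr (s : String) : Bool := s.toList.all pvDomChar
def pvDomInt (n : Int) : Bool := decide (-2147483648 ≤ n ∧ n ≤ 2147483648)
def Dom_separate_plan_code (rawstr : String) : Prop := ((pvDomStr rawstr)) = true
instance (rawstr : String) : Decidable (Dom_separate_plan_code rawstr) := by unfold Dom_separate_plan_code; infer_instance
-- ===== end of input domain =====

-- B replaces A's split-into-lines indexed scan (found-flag + two join-of-slices) by a
-- recursive descent on the character stream that builds the plan back-to-front (alternative).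

-- ===== PORT A =====
-- l.startswith("def ") and l.strip().endswith(":")
def pvHeader (l : List Char) : Bool :=
  PySem.Chars.startswith l ['d','e','f',' '] && PySem.Chars.endswith (PySem.Chars.strip l) [':']

-- the for-loop with the found_code flag: index of the first header line, if any
def pvFindA : List (List Char) → Option Nat
  | [] => none
  | l :: rest => if pvHeader l then some 0 else (pvFindA rest).map (· + 1)

-- s.split("\n"): the separator is nonempty, so Python's split never raises; Chars.splitOn is exact
def separate_plan_code (rawstr : String) : Option String × Option String :=
  match pvFindA (PySem.Chars.splitOn (PySem.Chars.strip rawstr.toList) ['\n']) with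
  | some i => (some (String.ofList (PySem.Chars.join ['\n'] ((PySem.Chars.splitOn (PySem.Chars.strip rawstr.toList) ['\n']).take i))),
               some (String.ofList (PySem.Chars.join ['\n'] ((PySem.Chars.splitOn (PySem.Chars.strip rawstr.toList) ['\n']).drop i))))
  | none => (none, none)

-- ===== PORT B =====
-- line.startswith("def ") and line.rstrip().endswith(":")
def pvHeaderB (l : List Char) : Bool :=
  PySem.Chars.startswith l ['d','e','f',' '] && PySem.Chars.endswith (PySem.Chars.rstrip l) [':']

-- _sep from Source B: recursive descent on the stream; none = "no header line found"
def pvSep (s : List Char) : Option (Option (List Char) × List Char) :=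
  if h : PySem.Chars.find s ['\n'] = -1 then
    if pvHeaderB s then some (none, s) else none
  else
    let line := PySem.Chars.slice s none (some (PySem.Chars.find s ['\n']))
    if pvHeaderB line then some (none, s)
    else
      match pvSep (PySem.Chars.slice s (some (PySem.Chars.find s ['\n'] + 1)) none) with
      | none => none
      | some (p, c) =>
          some (some (match p with
                      | none => line
                      | some p' => line ++ '\n' :: p'), c)
termination_by s.length
decreasing_by
  have h0 : 0 ≤ PySem.Chars.find s ['\n'] := by
    have := PySem.Chars.neg_one_le_find s ['\n']; omega
  have hne : s ≠ [] := by
    intro hs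
    exact h (by rw [hs]; decide)
  simp only [PySem.Chars.slice_eq_listSlice, PySem.List.slice_from s (by omega : (0:Int) ≤ PySem.Chars.find s ['\n'] + 1), List.length_drop]
  have : 0 < s.length := List.length_pos_iff.mpr hne
  omega

def separate_plan_code_alt (rawstr : String) : Option String × Option String :=
  match pvSep (PySem.Chars.strip rawstr.toList) with
  | none => (none, none)
  | some (p, c) => (some (String.ofList (p.getD [])), some (String.ofList c))

-- ===== PRECONDITION & SPEC =====
def Spec_separate_plan_code (rawstr : String) (out : Option String × Option String) : Prop := out = separate_plan_code_alt rawstr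
instance (rawstr : String) (out : Option String × Option String) : Decidable (Spec_separate_plan_code rawstr out) := by unfold Spec_separate_plan_code; infer_instance

-- ===== CLAIM (what is proved, stated in full; the proofs are below) =====
def Claim_equal_separate_plan_code : Prop := ∀ (rawstr : String), Dom_separate_plan_code rawstr → Spec_separate_plan_code rawstr (separate_plan_code rawstr)

-- ===== LEMMAS AND PROOFS =====

-- accumulator law for splitOn.go
lemma pv_go_acc (sep : List Char) : ∀ (fuel : Nat) (l cur : List Char) (acc : List (List Char)),
    PySem.Chars.splitOn.go sep fuel l cur acc = acc.reverse ++ PySem.Chars.splitOn.go sep fuel l cur [] := by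
  intro fuel
  induction fuel with
  | zero => intro l cur acc; simp [PySem.Chars.splitOn.go]
  | succ f ih =>
    intro l cur acc
    cases l with
    | nil => simp [PySem.Chars.splitOn.go]
    | cons c rest =>
      simp only [PySem.Chars.splitOn.go]
      split
      · rw [ih (List.drop sep.length (c :: rest)) [] (cur.reverse :: acc),
            ih (List.drop sep.length (c :: rest)) [] [cur.reverse]]
        simp
      · rw [ih rest (c :: cur) acc]

-- fuel is irrelevant once it exceeds the length
lemma pv_go_fuel (sep : List Char) (hsep : sep ≠ []) :
    ∀ (f₁ : Nat) (l cur : List Char) (acc : List (List Char)) (f₂ : Nat),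
      l.length < f₁ → l.length < f₂ →
      PySem.Chars.splitOn.go sep f₁ l cur acc = PySem.Chars.splitOn.go sep f₂ l cur acc := by
  intro f₁
  induction f₁ with
  | zero => intro l cur acc f₂ h1 h2; omega
  | succ g ih =>
    intro l cur acc f₂ h1 h2
    cases l with
    | nil =>
      obtain ⟨g₂, rfl⟩ : ∃ g₂, f₂ = g₂ + 1 := ⟨f₂ - 1, by omega⟩
      simp [PySem.Chars.splitOn.go]
    | cons c rest =>
      obtain ⟨g₂, rfl⟩ : ∃ g₂, f₂ = g₂ + 1 := ⟨f₂ - 1, by omega⟩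
      have hslen : 1 ≤ sep.length := by
        cases sep with
        | nil => exact absurd rfl hsep
        | cons a b => simp
      simp only [PySem.Chars.splitOn.go]
      split
      · exact ih _ _ _ g₂ (by simp at h1 ⊢; omega) (by simp at h2 ⊢; omega)
      · exact ih _ _ _ g₂ (by simp at h1 ⊢; omega) (by simp at h2 ⊢; omega)

-- no occurrence of sep: one piece
lemma pv_go_no_occ (sep : List Char) : ∀ (l : List Char), ¬ sep <:+: l →
    ∀ (fuel : Nat) (cur : List Char) (acc : List (List Char)),
      PySem.Chars.splitOn.go sep fuel l cur acc = ((cur.reverse ++ l) :: acc).reverse := by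
  intro l
  induction l with
  | nil => intro h fuel cur acc; cases fuel <;> simp [PySem.Chars.splitOn.go]
  | cons c rest ih =>
    intro h fuel cur acc
    cases fuel with
    | zero => simp [PySem.Chars.splitOn.go]
    | succ f =>
      have hp : sep.isPrefixOf (c :: rest) = false := by
        rw [Bool.eq_false_iff]
        intro hb
        exact h (List.IsPrefix.isInfix (List.isPrefixOf_iff_prefix.mp hb))
      have hrest : ¬ sep <:+: rest :=
        fun hi => h (hi.trans (List.suffix_cons c rest).isInfix)
      simp only [PySem.Chars.splitOn.go, hp]
      rw [if_neg (by simp), ih hrest]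
      simp

-- first occurrence at n: one piece cut off, then splitOn of the rest
lemma pv_go_occ (sep : List Char) (hsep : sep ≠ []) :
    ∀ (n : Nat) (l cur : List Char) (acc : List (List Char)) (fuel : Nat), l.length < fuel →
      sep <+: l.drop n → (∀ i < n, ¬ sep <+: l.drop i) →
      PySem.Chars.splitOn.go sep fuel l cur acc
        = acc.reverse ++ [cur.reverse ++ l.take n] ++ PySem.Chars.splitOn (l.drop (n + sep.length)) sep := by
  have hslen : 1 ≤ sep.length := by
    cases sep with
    | nil => exact absurd rfl hsep
    | cons a b => simp
  intro n
  induction n with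
  | zero =>
    intro l cur acc fuel hf hocc _hmin
    cases l with
    | nil =>
      simp only [List.drop_nil] at hocc
      exact absurd (List.prefix_nil.mp hocc) hsep
    | cons c rest =>
      obtain ⟨f, rfl⟩ : ∃ f, fuel = f + 1 := ⟨fuel - 1, by simp at hf; omega⟩
      have hp : sep.isPrefixOf (c :: rest) = true :=
        List.isPrefixOf_iff_prefix.mpr (by simpa using hocc)
      simp only [PySem.Chars.splitOn.go, hp, if_pos]
      rw [pv_go_acc]
      rw [pv_go_fuel sep hsep f _ [] [] ((List.drop sep.length (c :: rest)).length + 1)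
            (by simp at hf ⊢; omega) (by omega)]
      simp only [List.take_zero, List.append_nil, Nat.zero_add]
      rw [show PySem.Chars.splitOn.go sep ((List.drop sep.length (c :: rest)).length + 1)
            (List.drop sep.length (c :: rest)) [] []
          = PySem.Chars.splitOn (List.drop sep.length (c :: rest)) sep from rfl]
      simp
  | succ m ih =>
    intro l cur acc fuel hf hocc hmin
    cases l with
    | nil =>
      simp only [List.drop_nil] at hocc
      exact absurd (List.prefix_nil.mp hocc) hsep
    | cons c rest =>
      obtain ⟨f, rfl⟩ : ∃ f, fuel = f + 1 := ⟨fuel - 1, by simp at hf; omega⟩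
      have hp : sep.isPrefixOf (c :: rest) = false := by
        rw [Bool.eq_false_iff]
        intro hb
        exact hmin 0 (Nat.succ_pos m) (by simpa using List.isPrefixOf_iff_prefix.mp hb)
      simp only [PySem.Chars.splitOn.go, hp]
      rw [if_neg (by simp)]
      rw [ih rest (c :: cur) acc f (by simp at hf; omega) (by simpa using hocc)
            (fun i hi => by simpa using hmin (i + 1) (by omega))]
      simp only [List.reverse_cons, List.take_succ_cons]
      have : (m + 1 + sep.length) = (m + sep.length) + 1 := by omega
      rw [this, List.drop_succ_cons]
      simp

lemma pv_splitOn_no_occ (s sep : List Char) (h : ¬ sep <:+: s) :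
    PySem.Chars.splitOn s sep = [s] := by
  unfold PySem.Chars.splitOn
  rw [pv_go_no_occ sep s h]
  simp

lemma pv_splitOn_find (s sep : List Char) (hsep : sep ≠ []) (h : 0 ≤ PySem.Chars.find s sep) :
    PySem.Chars.splitOn s sep
      = s.take (PySem.Chars.find s sep).toNat
        :: PySem.Chars.splitOn (s.drop ((PySem.Chars.find s sep).toNat + sep.length)) sep := by
  obtain ⟨hocc, hmin⟩ := PySem.Chars.find_spec h
  unfold PySem.Chars.splitOn
  rw [pv_go_occ sep hsep _ s [] [] (s.length + 1) (by omega) hocc hmin]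
  simp only [List.reverse_nil, List.nil_append, List.cons_append]
  rfl

lemma pv_splitOn_ne_nil (s sep : List Char) (hsep : sep ≠ []) :
    PySem.Chars.splitOn s sep ≠ [] := by
  by_cases h : PySem.Chars.find s sep = -1
  · rw [pv_splitOn_no_occ s sep ((PySem.Chars.find_eq_neg_one_iff s sep).mp h)]; simp
  · have h0 : 0 ≤ PySem.Chars.find s sep := by
      have := PySem.Chars.neg_one_le_find s sep; omega
    rw [pv_splitOn_find s sep hsep h0]; simp

-- sep.join(s.split(sep)) == s
lemma pv_join_splitOn (sep : List Char) (hsep : sep ≠ []) (s : List Char) :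
    PySem.Chars.join sep (PySem.Chars.splitOn s sep) = s := by
  by_cases h : PySem.Chars.find s sep = -1
  · rw [pv_splitOn_no_occ s sep ((PySem.Chars.find_eq_neg_one_iff s sep).mp h),
        PySem.Chars.join_singleton]
  · have h0 : 0 ≤ PySem.Chars.find s sep := by
      have := PySem.Chars.neg_one_le_find s sep; omega
    obtain ⟨hocc, _⟩ := PySem.Chars.find_spec h0
    have hslen : 1 ≤ sep.length := by
      cases sep with
      | nil => exact absurd rfl hsep
      | cons a b => simp
    have hne : s ≠ [] := by
      intro hs
      rw [hs] at h
      exact h ((PySem.Chars.find_eq_neg_one_iff [] sep).mpr (by simp [hsep]))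
    rw [pv_splitOn_find s sep hsep h0]
    obtain ⟨a, t, hat⟩ : ∃ a t,
        PySem.Chars.splitOn (s.drop ((PySem.Chars.find s sep).toNat + sep.length)) sep = a :: t := by
      cases hsplit : PySem.Chars.splitOn (s.drop ((PySem.Chars.find s sep).toNat + sep.length)) sep with
      | nil => exact absurd hsplit (pv_splitOn_ne_nil _ sep hsep)
      | cons a t => exact ⟨a, t, rfl⟩
    rw [hat, PySem.Chars.join_cons_cons, ← hat,
        pv_join_splitOn sep hsep (s.drop ((PySem.Chars.find s sep).toNat + sep.length))]
    obtain ⟨t2, ht2⟩ := hocc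
    have hdrop : s.drop ((PySem.Chars.find s sep).toNat + sep.length) = t2 := by
      rw [← List.drop_drop, ← ht2, List.drop_left]
    rw [hdrop, List.append_assoc, ht2, List.take_append_drop]
termination_by s.length
decreasing_by
  have : 0 < s.length := List.length_pos_iff.mpr hne
  simp only [List.length_drop]
  omega

-- the two header tests agree (when the line starts with "def ", lstrip is the identity)
lemma pv_header_eq (l : List Char) : pvHeader l = pvHeaderB l := by
  unfold pvHeader pvHeaderB
  cases hp : PySem.Chars.startswith l ['d','e','f',' '] with
  | false => simp
  | true =>
    obtain ⟨t, ht⟩ := (PySem.Chars.startswith_iff l _).mp hp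
    have hstrip : PySem.Chars.strip l = PySem.Chars.rstrip l := by
      unfold PySem.Chars.strip
      congr 1
      unfold PySem.Chars.lstrip
      rw [← ht]
      simp [show PySem.Chars.isspace 'd' = false from by decide]
    rw [hstrip]

-- the core correspondence: B's recursive descent computes exactly A's find-index form
lemma pv_main (s : List Char) :
    pvSep s = (pvFindA (PySem.Chars.splitOn s ['\n'])).map
      (fun i => ((if i = 0 then none
                  else some (PySem.Chars.join ['\n'] ((PySem.Chars.splitOn s ['\n']).take i))),
                 PySem.Chars.join ['\n'] ((PySem.Chars.splitOn s ['\n']).drop i))) := by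
  by_cases h : PySem.Chars.find s ['\n'] = -1
  · rw [pv_splitOn_no_occ s ['\n'] ((PySem.Chars.find_eq_neg_one_iff _ _).mp h)]
    rw [pvSep, dif_pos h]
    rw [show pvHeaderB s = pvHeader s from (pv_header_eq s).symm]
    cases hh : pvHeader s <;>
      simp [pvFindA, hh, PySem.Chars.join_singleton]
  · have h0 : 0 ≤ PySem.Chars.find s ['\n'] := by
      have := PySem.Chars.neg_one_le_find s ['\n']; omega
    have hne : s ≠ [] := by
      intro hs
      rw [hs] at h
      exact h ((PySem.Chars.find_eq_neg_one_iff [] ['\n']).mpr (by simp))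
    have hline : PySem.Chars.slice s none (some (PySem.Chars.find s ['\n']))
        = s.take (PySem.Chars.find s ['\n']).toNat := by
      rw [PySem.Chars.slice_eq_listSlice, PySem.List.slice_to s h0]
    have hrest : PySem.Chars.slice s (some (PySem.Chars.find s ['\n'] + 1)) none
        = s.drop ((PySem.Chars.find s ['\n']).toNat + 1) := by
      rw [PySem.Chars.slice_eq_listSlice, PySem.List.slice_from s (by omega)]
      congr 1
      omega
    have hs : PySem.Chars.splitOn s ['\n']
        = s.take (PySem.Chars.find s ['\n']).toNat
          :: PySem.Chars.splitOn (s.drop ((PySem.Chars.find s ['\n']).toNat + 1)) ['\n'] := by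
      simpa using pv_splitOn_find s ['\n'] (by simp) h0
    have hjoin : PySem.Chars.join ['\n']
        (s.take (PySem.Chars.find s ['\n']).toNat
          :: PySem.Chars.splitOn (s.drop ((PySem.Chars.find s ['\n']).toNat + 1)) ['\n']) = s := by
      rw [← hs]; exact pv_join_splitOn ['\n'] (by simp) s
    rw [pvSep, dif_neg h]
    simp only [hline, hrest, hs]
    rw [show pvHeaderB (s.take (PySem.Chars.find s ['\n']).toNat)
          = pvHeader (s.take (PySem.Chars.find s ['\n']).toNat)
        from (pv_header_eq _).symm]
    cases hh : pvHeader (s.take (PySem.Chars.find s ['\n']).toNat) with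
    | true => simp [pvFindA, hh, hjoin]
    | false =>
      rw [pv_main (s.drop ((PySem.Chars.find s ['\n']).toNat + 1))]
      simp only [pvFindA, hh, Bool.false_eq_true, if_false]
      cases hA : pvFindA (PySem.Chars.splitOn (s.drop ((PySem.Chars.find s ['\n']).toNat + 1)) ['\n']) with
      | none => simp
      | some j =>
        cases j with
        | zero => simp [PySem.Chars.join_singleton]
        | succ j' =>
          obtain ⟨a, t, hat⟩ : ∃ a t,
              PySem.Chars.splitOn (s.drop ((PySem.Chars.find s ['\n']).toNat + 1)) ['\n'] = a :: t := by
            cases hsplit : PySem.Chars.splitOn (s.drop ((PySem.Chars.find s ['\n']).toNat + 1)) ['\n'] with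
            | nil => exact absurd hsplit (pv_splitOn_ne_nil _ ['\n'] (by simp))
            | cons a t => exact ⟨a, t, rfl⟩
          simp [hat, PySem.Chars.join_cons_cons]
termination_by s.length
decreasing_by
  have : 0 < s.length := List.length_pos_iff.mpr hne
  simp only [List.length_drop]
  omega

-- ===== VERDICT (by name: the statement is the Claim_ definition above) =====
theorem separate_plan_code_spec : Claim_equal_separate_plan_code := by
  intro rawstr _
  unfold Spec_separate_plan_code separate_plan_code separate_plan_code_alt
  rw [pv_main]
  cases hA : pvFindA (PySem.Chars.splitOn (PySem.Chars.strip rawstr.toList) ['\n']) with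
  | none => simp
  | some i =>
    by_cases hi : i = 0
    · subst hi; simp [PySem.Chars.join_nil]
    · simp [hi]
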